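-- pv_equiv track=rewrite | github.com/balker0322/advent_of_code_2022 | 08/part1.py | visibility_check
-- ===== SOURCE A (Python) =====
-- def visibility_check(tree_list:list, viewer_height=-1, reverse_tree_list=False):
--     tree_visibility_list = []
--     if reverse_tree_list:
--         tree_list = list(tree_list)
--         tree_list.reverse()
--     max_tree = viewer_height
--     for tree in tree_list:
--         if tree > max_tree:
--             max_tree = tree
--             tree_visibility_list.append(True)
--             continue
--         tree_visibility_list.append(False)
--     if reverse_tree_list:
--         tree_visibility_list = list(tree_visibility_list)
--         tree_visibility_list.reverse()
--     return tree_visibility_list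
-- ===== SOURCE B (Python) =====
-- def visibility_check(tree_list: list, viewer_height=-1, reverse_tree_list=False):
--     seq = tree_list[::-1] if reverse_tree_list else tree_list
--     # prefix[i] = max of viewer_height and the first i trees
--     prefix = [viewer_height]
--     for t in seq:
--         prefix.append(max(prefix[-1], t))
--     flags = [t > p for t, p in zip(seq, prefix)]
--     return flags[::-1] if reverse_tree_list else flags
-- ===== Notes on version B (the rewrite author's own statement) =====
-- stated objective: alternative
-- what changed: replaces A's fused running-max-and-flag loop with a prefix-maximum table built first, then a separate zip pass comparing each tree to the max of everything strictly before it
import Mathlib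
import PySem

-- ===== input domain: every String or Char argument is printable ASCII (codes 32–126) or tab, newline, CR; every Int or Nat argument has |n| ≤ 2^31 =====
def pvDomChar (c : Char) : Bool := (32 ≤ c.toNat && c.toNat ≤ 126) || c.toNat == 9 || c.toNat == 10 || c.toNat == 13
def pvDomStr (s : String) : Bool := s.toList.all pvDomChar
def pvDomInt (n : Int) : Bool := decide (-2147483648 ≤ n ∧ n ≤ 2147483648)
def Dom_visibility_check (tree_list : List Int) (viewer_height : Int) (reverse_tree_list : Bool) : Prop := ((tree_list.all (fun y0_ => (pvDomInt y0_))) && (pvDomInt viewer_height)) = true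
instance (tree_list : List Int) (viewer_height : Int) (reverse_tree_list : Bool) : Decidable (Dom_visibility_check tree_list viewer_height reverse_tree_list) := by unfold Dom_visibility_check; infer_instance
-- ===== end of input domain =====

-- ===== PORT A =====
def visibility_check (tree_list : List Int) (viewer_height : Int) (reverse_tree_list : Bool) : List Bool :=
  let tl := if reverse_tree_list then tree_list.reverse else tree_list
  let res := tl.foldl (fun (st : Int × List Bool) tree =>
      if tree > st.1 then (tree, st.2 ++ [true]) else (st.1, st.2 ++ [false]))
      (viewer_height, [])
  if reverse_tree_list then res.2.reverse else res.2

-- ===== PORT B =====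
-- B builds a prefix-maximum table first, then compares in a separate zip pass (alternative decomposition, same cost).
def visibility_check_alt (tree_list : List Int) (viewer_height : Int) (reverse_tree_list : Bool) : List Bool :=
  let seq := if reverse_tree_list then tree_list.reverse else tree_list
  let pfx := List.scanl (fun p t => max p t) viewer_height seq
  let flags := List.zipWith (fun t p => decide (t > p)) seq pfx
  if reverse_tree_list then flags.reverse else flags

-- ===== PRECONDITION & SPEC =====
def Spec_visibility_check (tree_list : List Int) (viewer_height : Int) (reverse_tree_list : Bool) (out : List Bool) : Prop := out = visibility_check_alt tree_list viewer_height reverse_tree_list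
instance (tree_list : List Int) (viewer_height : Int) (reverse_tree_list : Bool) (out : List Bool) : Decidable (Spec_visibility_check tree_list viewer_height reverse_tree_list out) := by unfold Spec_visibility_check; infer_instance

-- ===== CLAIM (what is proved, stated in full; the proofs are below) =====
def Claim_equal_visibility_check : Prop := ∀ (tree_list : List Int) (viewer_height : Int) (reverse_tree_list : Bool), Dom_visibility_check tree_list viewer_height reverse_tree_list → Spec_visibility_check tree_list viewer_height reverse_tree_list (visibility_check tree_list viewer_height reverse_tree_list)

-- ===== LEMMAS AND PROOFS =====

-- A's fused loop produces exactly the comparison of each tree with the running prefix maximum.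
lemma vis_loop_eq (ts : List Int) (m : Int) (acc : List Bool) :
    (ts.foldl (fun (st : Int × List Bool) tree =>
      if tree > st.1 then (tree, st.2 ++ [true]) else (st.1, st.2 ++ [false]))
      (m, acc)).2
    = acc ++ List.zipWith (fun t p => decide (t > p)) ts (List.scanl (fun p t => max p t) m ts) := by
  induction ts generalizing m acc with
  | nil => simp
  | cons t ts ih =>
    simp only [List.foldl_cons, List.scanl_cons, List.zipWith_cons_cons]
    by_cases h : t > m
    · have hm : max m t = t := by omega
      simp [h, ih, hm]
    · have hm : max m t = m := by omega
      simp [h, ih, hm]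

-- ===== VERDICT (by name: the statement is the Claim_ definition above) =====
theorem visibility_check_spec : Claim_equal_visibility_check := by
  intro tree_list viewer_height reverse_tree_list _
  unfold Spec_visibility_check visibility_check visibility_check_alt
  simp only [vis_loop_eq, List.nil_append]
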